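-- pv_equiv track=rewrite | github.com/DucLe-2005/Everyday-leetcode | 723-candy-crush/candy-crush.py | candyCrush
-- ===== SOURCE A (Python) =====
-- from typing import List
--
-- def candyCrush(board: List[List[int]]) -> List[List[int]]:
--     m, n = len(board), len(board[0])
--     while True:
--     # Mark all cells to crush
--         crush = [[False] * n for _ in range(m)]
--         has_crush = False
--
--         # Horizontal
--         for i in range(m):
--             for j in range(n - 2):
--                 if board[i][j] != 0 and board[i][j] == board[i][j+1] == board[i][j+2]:
--                     crush[i][j] = crush[i][j+1] = crush[i][j+2] = True
--                     has_crush = True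
--
--         # Vertical
--         for j in range(n):
--             for i in range(m - 2):
--                 if board[i][j] != 0 and board[i][j] == board[i+1][j] == board[i+2][j]:
--                     crush[i][j] = crush[i+1][j] = crush[i+2][j] = True
--                     has_crush = True
--
--         if not has_crush:
--             break
--
--         # Crush marked cells
--         for i in range(m):
--             for j in range(n):
--                 if crush[i][j]:
--                     board[i][j] = 0
--
--         # Drop candies
--         for j in range(n):
--             write_index = m - 1
--
--             for i in range(m - 1, -1, -1):
--                 if board[i][j] != 0:
--                     board[write_index][j] = board[i][j]
--                     write_index -= 1
--
--             while write_index >= 0: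
--                 board[write_index][j] = 0
--                 write_index -= 1
--
--     return board
-- ===== SOURCE B (Python) =====
-- from typing import List
--
-- def candyCrush(board: List[List[int]]) -> List[List[int]]:
--     m, n = len(board), len(board[0])
--
--     def crushable(i, j):
--         # a cell is crushed iff it lies inside some window of 3 equal nonzero cells
--         if board[i][j] == 0:
--             return False
--         for a in (j - 2, j - 1, j):
--             if a >= 0 and a + 2 < n and board[i][a] == board[i][a + 1] == board[i][a + 2]:
--                 return True
--         for a in (i - 2, i - 1, i):
--             if a >= 0 and a + 2 < m and board[a][j] == board[a + 1][j] == board[a + 2][j]: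
--                 return True
--         return False
--
--     while True:
--         changed = False
--         newcols = []
--         for j in range(n):
--             col = []
--             for i in range(m):
--                 if crushable(i, j):
--                     changed = True
--                 elif board[i][j] != 0:
--                     col.append(board[i][j])
--             newcols.append([0] * (m - len(col)) + col)
--         if not changed:
--             return board
--         for j in range(n):
--             for i in range(m):
--                 board[i][j] = newcols[j][i]
-- ===== Notes on version B (the rewrite author's own statement) =====
-- stated objective: alternative
-- what changed: Replaces A's boolean crush matrix + zeroing pass + in-place two-pointer gravity with a per-cell local 'crushable' window predicate (no mark matrix) and a functional rebuild of each column as zero padding plus the surviving values.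
-- outside the precondition, e.g. on candyCrush([[1, 2], [3, 4], [5]]): A returns [[1, 2], [3, 4], [5]], B raises IndexError
import Mathlib
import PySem

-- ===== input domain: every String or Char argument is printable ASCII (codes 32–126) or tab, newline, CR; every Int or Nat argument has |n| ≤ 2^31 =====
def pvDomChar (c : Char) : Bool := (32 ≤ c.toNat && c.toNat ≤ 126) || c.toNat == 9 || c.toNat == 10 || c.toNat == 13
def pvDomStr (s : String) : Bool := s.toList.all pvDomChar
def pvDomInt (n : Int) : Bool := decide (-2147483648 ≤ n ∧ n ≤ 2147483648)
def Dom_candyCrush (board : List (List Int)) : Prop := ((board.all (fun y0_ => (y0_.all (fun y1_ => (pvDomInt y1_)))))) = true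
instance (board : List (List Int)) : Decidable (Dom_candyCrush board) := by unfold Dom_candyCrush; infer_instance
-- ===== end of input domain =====

-- B replaces A's boolean crush matrix + zeroing pass + in-place two-pointer gravity by a
-- per-cell 'crushable' window predicate and a functional rebuild of each column
-- (zero padding ++ surviving values); equivalence is about the RETURN value (both Pythons
-- also mutate the argument in place).

-- Shared small helpers: read/write one cell of a list-of-lists (indices are in range on
-- every access both ports make on Pre_ inputs).
def mGet {α : Type} (d : α) (b : List (List α)) (i j : Nat) : α := (b.getD i []).getD j d
def mSet {α : Type} (b : List (List α)) (i j : Nat) (v : α) : List (List α) :=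
  b.set i ((b.getD i []).set j v)

-- ===== PORT A =====
-- condition of A's horizontal triple  board[i][j] != 0 and board[i][j] == board[i][j+1] == board[i][j+2]
def winH_A (b : List (List Int)) (i j : Nat) : Bool :=
  (mGet 0 b i j != 0) && (mGet 0 b i j == mGet 0 b i (j+1)) && (mGet 0 b i (j+1) == mGet 0 b i (j+2))
def winV_A (b : List (List Int)) (i j : Nat) : Bool :=
  (mGet 0 b i j != 0) && (mGet 0 b i j == mGet 0 b (i+1) j) && (mGet 0 b (i+1) j == mGet 0 b (i+2) j)

-- A's two marking passes building the crush matrix and has_crush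
def markA (b : List (List Int)) (m n : Nat) : List (List Bool) × Bool :=
  let s1 := (List.range m).foldl (fun s i =>
    (List.range (n-2)).foldl (fun s j =>
      if winH_A b i j then (mSet (mSet (mSet s.1 i j true) i (j+1) true) i (j+2) true, true) else s) s)
    (List.replicate m (List.replicate n false), false)
  (List.range n).foldl (fun s j =>
    (List.range (m-2)).foldl (fun s i =>
      if winV_A b i j then (mSet (mSet (mSet s.1 i j true) (i+1) j true) (i+2) j true, true) else s) s) s1

-- 'Crush marked cells'
def crushA (b : List (List Int)) (c : List (List Bool)) (m n : Nat) : List (List Int) :=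
  (List.range m).foldl (fun b i => (List.range n).foldl (fun b j =>
    if mGet false c i j then mSet b i j 0 else b) b) b

-- the trailing 'while write_index >= 0: board[write_index][j] = 0' loop
def fillZ (b : List (List Int)) (j : Nat) (wi : Int) : List (List Int) :=
  if h : 0 ≤ wi then fillZ (mSet b wi.toNat j 0) j (wi - 1) else b
termination_by (wi + 1).toNat
decreasing_by omega

-- one column of A's gravity drop (write_index never is negative when written through)
def dropColA (b : List (List Int)) (j m : Nat) : List (List Int) :=
  let s := ((List.range m).reverse).foldl
    (fun (s : List (List Int) × Int) i =>
      if mGet 0 s.1 i j != 0 then (mSet s.1 s.2.toNat j (mGet 0 s.1 i j), s.2 - 1) else s)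
    (b, (m : Int) - 1)
  fillZ s.1 j s.2

def dropA (b : List (List Int)) (m n : Nat) : List (List Int) :=
  (List.range n).foldl (fun b j => dropColA b j m) b

-- A's 'while True'; fuel m*n+1 is a pure totality guard (each crushing round zeroes at
-- least one nonzero cell, so at most m*n rounds crush and the fuel is never exhausted).
def loopA (fuel : Nat) (b : List (List Int)) (m n : Nat) : List (List Int) :=
  match fuel with
  | 0 => b
  | f + 1 =>
    let s := markA b m n
    if !s.2 then b
    else loopA f (dropA (crushA b s.1 m n) m n) m n

def candyCrush (board : List (List Int)) : List (List Int) :=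
  loopA (board.length * (board.headD []).length + 1) board board.length (board.headD []).length

-- ===== PORT B =====
def hWin (b : List (List Int)) (i a : Nat) : Bool :=
  (mGet 0 b i a == mGet 0 b i (a+1)) && (mGet 0 b i (a+1) == mGet 0 b i (a+2))
def vWin (b : List (List Int)) (a j : Nat) : Bool :=
  (mGet 0 b a j == mGet 0 b (a+1) j) && (mGet 0 b (a+1) j == mGet 0 b (a+2) j)

-- Source B's crushable(i, j): the candidate window starts j-2, j-1, j are Python ints (may be
-- negative); the 'a >= 0' guard precedes every indexed access, so .toNat is only read
-- under 0 ≤ a and the port is exact.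
def crushableB (b : List (List Int)) (m n i j : Nat) : Bool :=
  if mGet 0 b i j == 0 then false
  else
    [(j:Int) - 2, (j:Int) - 1, (j:Int)].any (fun a =>
        decide (0 ≤ a) && decide (a + 2 < (n:Int)) && hWin b i a.toNat)
    || [(i:Int) - 2, (i:Int) - 1, (i:Int)].any (fun a =>
        decide (0 ≤ a) && decide (a + 2 < (m:Int)) && vWin b a.toNat j)

def buildColB (b : List (List Int)) (m n j : Nat) (changed : Bool) : List Int × Bool :=
  (List.range m).foldl (fun (t : List Int × Bool) i =>
      if crushableB b m n i j then (t.1, true)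
      else if mGet 0 b i j != 0 then (t.1 ++ [mGet 0 b i j], t.2) else t)
    ([], changed)

def buildB (b : List (List Int)) (m n : Nat) : List (List Int) × Bool :=
  (List.range n).foldl (fun (s : List (List Int) × Bool) j =>
      let t := buildColB b m n j s.2
      (s.1 ++ [List.replicate (m - t.1.length) 0 ++ t.1], t.2))
    ([], false)

def writeB (b : List (List Int)) (cols : List (List Int)) (m n : Nat) : List (List Int) :=
  (List.range n).foldl (fun b j =>
    (List.range m).foldl (fun b i => mSet b i j (mGet 0 cols j i)) b) b

-- Source B's 'while True'; same totality fuel as in port A.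
def loopB (fuel : Nat) (b : List (List Int)) (m n : Nat) : List (List Int) :=
  match fuel with
  | 0 => b
  | f + 1 =>
    let s := buildB b m n
    if !s.2 then b else loopB f (writeB b s.1 m n) m n

def candyCrush_alt (board : List (List Int)) : List (List Int) :=
  loopB (board.length * (board.headD []).length + 1) board board.length (board.headD []).length

-- ===== PRECONDITION & SPEC =====
-- Pre_ excludes the empty board (A's board[0] raises IndexError) and ragged boards with a
-- row shorter than row 0: there both programs index past the short row and usually raise
-- IndexError, but A's chained comparisons can short-circuit before the bad access and
-- return the board unchanged, while B's per-cell predicate reads it and raises.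
def Pre_candyCrush (board : List (List Int)) : Prop :=
  board ≠ [] ∧ ∀ r ∈ board, (board.headD []).length ≤ r.length
instance (board : List (List Int)) : Decidable (Pre_candyCrush board) := by
  unfold Pre_candyCrush; infer_instance
def pvWitness_candyCrush : List (List Int) := [[1, 1, 1], [2, 0, 2]]

def Spec_candyCrush (board : List (List Int)) (out : List (List Int)) : Prop := out = candyCrush_alt board
instance (board : List (List Int)) (out : List (List Int)) : Decidable (Spec_candyCrush board out) := by unfold Spec_candyCrush; infer_instance

-- ===== CLAIM (what is proved, stated in full; the proofs are below) =====
def Claim_equal_candyCrush : Prop := ∀ (board : List (List Int)), Dom_candyCrush board → Pre_candyCrush board → Spec_candyCrush board (candyCrush board)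

-- ===== LEMMAS AND PROOFS =====

def markSpec (b : List (List Int)) (m n p q : Nat) : Bool :=
  (decide (p < m) && (List.range (n-2)).any (fun a => winH_A b p a && decide (a ≤ q ∧ q ≤ a + 2)))
  || (decide (q < n) && (List.range (m-2)).any (fun a => winV_A b a q && decide (a ≤ p ∧ p ≤ a + 2)))

theorem row_mSet {α : Type} (b : List (List α)) (i j p : Nat) (v : α) :
    ((mSet b i j v).getD p []).length = (b.getD p []).length := by
  simp only [mSet, List.getD_eq_getElem?_getD, List.getElem?_set]
  by_cases h : i = p
  · subst h
    by_cases hl : i < b.length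
    · simp [hl]
    · simp [hl]
  · simp [h]

theorem mGet_mSet {α : Type} (d : α) (b : List (List α)) (i j : Nat) (v : α) (p q : Nat)
    (hi : i < b.length) (hj : j < (b.getD i []).length) :
    mGet d (mSet b i j v) p q = if p = i ∧ q = j then v else mGet d b p q := by
  simp only [mGet, mSet, List.getD_eq_getElem?_getD, List.getElem?_set]
  by_cases h : i = p
  · subst h
    simp only [hi, if_pos rfl, if_pos hi]
    by_cases hq : q = j
    · subst hq
      simp [List.getD_eq_getElem?_getD, List.getElem?_set, hj, ← List.getD_eq_getElem?_getD]
    · simp [List.getD_eq_getElem?_getD, List.getElem?_set, Ne.symm hq, hq]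
  · simp only [if_neg h]
    have : ¬ (p = i ∧ q = j) := fun hh => h hh.1.symm
    simp [this]

def CShape (c : List (List Bool)) (m n : Nat) : Prop :=
  c.length = m ∧ ∀ p, p < m → (c.getD p []).length = n

theorem cshape_mSet (c : List (List Bool)) (m n i j : Nat) (v : Bool) (hc : CShape c m n) :
    CShape (mSet c i j v) m n :=
  ⟨by simp [mSet, hc.1], fun p hp => by rw [row_mSet]; exact hc.2 p hp⟩

theorem mGet_replicate (m n p q : Nat) :
    mGet false (List.replicate m (List.replicate n false)) p q = false := by
  by_cases hp : p < m
  · simp [mGet, List.getD_eq_getElem?_getD, List.getElem?_replicate, hp]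
    by_cases hq : q < n <;> simp [List.getD_eq_getElem?_getD, List.getElem?_replicate, hq]
  · have : (List.replicate m (List.replicate n false) : List (List Bool))[p]? = none := by
      simp [List.getElem?_eq_none_iff]; omega
    simp [mGet, List.getD_eq_getElem?_getD, this]

theorem cshape_replicate (m n : Nat) : CShape (List.replicate m (List.replicate n false)) m n := by
  constructor
  · simp
  · intro p hp
    simp [List.getD_eq_getElem?_getD, List.getElem?_replicate, hp]

theorem mGet_set3H (c : List (List Bool)) (m n i a : Nat) (hc : CShape c m n)
    (hi : i < m) (ha : a + 2 < n) (p q : Nat) :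
    mGet false (mSet (mSet (mSet c i a true) i (a+1) true) i (a+2) true) p q
      = (mGet false c p q || decide (p = i ∧ a ≤ q ∧ q ≤ a + 2)) := by
  have hc1 := cshape_mSet c m n i a true hc
  have hc2 := cshape_mSet _ m n i (a+1) true hc1
  rw [mGet_mSet _ _ _ _ _ _ _ (by rw [hc2.1]; exact hi) (by rw [hc2.2 i hi]; omega),
      mGet_mSet _ _ _ _ _ _ _ (by rw [hc1.1]; exact hi) (by rw [hc1.2 i hi]; omega),
      mGet_mSet _ _ _ _ _ _ _ (by rw [hc.1]; exact hi) (by rw [hc.2 i hi]; omega)]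
  split_ifs with h1 h2 h3 <;> simp_all <;> omega

theorem mGet_set3V (c : List (List Bool)) (m n a j : Nat) (hc : CShape c m n)
    (hj : j < n) (ha : a + 2 < m) (p q : Nat) :
    mGet false (mSet (mSet (mSet c a j true) (a+1) j true) (a+2) j true) p q
      = (mGet false c p q || decide (q = j ∧ a ≤ p ∧ p ≤ a + 2)) := by
  have hc1 := cshape_mSet c m n a j true hc
  have hc2 := cshape_mSet _ m n (a+1) j true hc1
  rw [mGet_mSet _ _ _ _ _ _ _ (by rw [hc2.1]; omega) (by rw [hc2.2 (a+2) (by omega)]; omega),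
      mGet_mSet _ _ _ _ _ _ _ (by rw [hc1.1]; omega) (by rw [hc1.2 (a+1) (by omega)]; omega),
      mGet_mSet _ _ _ _ _ _ _ (by rw [hc.1]; omega) (by rw [hc.2 a (by omega)]; omega)]
  split_ifs with h1 h2 h3 <;> simp_all <;> omega

theorem markH_inner (b : List (List Int)) (m n i : Nat) (L : List Nat)
    (c : List (List Bool)) (fl : Bool) (hc : CShape c m n) (hi : i < m)
    (hL : ∀ a ∈ L, a + 2 < n) :
    CShape (L.foldl (fun s j => if winH_A b i j then (mSet (mSet (mSet s.1 i j true) i (j+1) true) i (j+2) true, true) else s) (c, fl)).1 m n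
    ∧ (L.foldl (fun s j => if winH_A b i j then (mSet (mSet (mSet s.1 i j true) i (j+1) true) i (j+2) true, true) else s) (c, fl)).2
        = (fl || L.any (winH_A b i))
    ∧ ∀ p q, mGet false (L.foldl (fun s j => if winH_A b i j then (mSet (mSet (mSet s.1 i j true) i (j+1) true) i (j+2) true, true) else s) (c, fl)).1 p q
        = (mGet false c p q || L.any (fun a => winH_A b i a && decide (p = i ∧ a ≤ q ∧ q ≤ a + 2))) := by
  induction L generalizing c fl with
  | nil => simp [hc]
  | cons a L ih =>
    have ha : a + 2 < n := hL a (by simp)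
    have hL' : ∀ x ∈ L, x + 2 < n := fun x hx => hL x (by simp [hx])
    by_cases hw : winH_A b i a
    · have hc3 : CShape (mSet (mSet (mSet c i a true) i (a+1) true) i (a+2) true) m n :=
        cshape_mSet _ m n _ _ _ (cshape_mSet _ m n _ _ _ (cshape_mSet _ m n _ _ _ hc))
      obtain ⟨ih1, ih2, ih3⟩ := ih _ true hc3 hL'
      refine ⟨by simpa [hw] using ih1, ?_, ?_⟩
      · simp only [List.foldl_cons, if_pos hw]
        rw [ih2]; simp [hw]
      · intro p q
        simp only [List.foldl_cons, if_pos hw]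
        rw [ih3 p q, mGet_set3H c m n i a hc hi ha p q]
        simp [hw, Bool.or_assoc]
    · obtain ⟨ih1, ih2, ih3⟩ := ih c fl hc hL'
      refine ⟨by simpa [hw] using ih1, ?_, ?_⟩
      · simp only [List.foldl_cons, if_neg hw]
        rw [ih2]; simp [hw]
      · intro p q
        simp only [List.foldl_cons, if_neg hw]
        rw [ih3 p q]; simp [hw]

theorem markV_inner (b : List (List Int)) (m n j : Nat) (L : List Nat)
    (c : List (List Bool)) (fl : Bool) (hc : CShape c m n) (hj : j < n)
    (hL : ∀ a ∈ L, a + 2 < m) :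
    CShape (L.foldl (fun s i => if winV_A b i j then (mSet (mSet (mSet s.1 i j true) (i+1) j true) (i+2) j true, true) else s) (c, fl)).1 m n
    ∧ (L.foldl (fun s i => if winV_A b i j then (mSet (mSet (mSet s.1 i j true) (i+1) j true) (i+2) j true, true) else s) (c, fl)).2
        = (fl || L.any (fun a => winV_A b a j))
    ∧ ∀ p q, mGet false (L.foldl (fun s i => if winV_A b i j then (mSet (mSet (mSet s.1 i j true) (i+1) j true) (i+2) j true, true) else s) (c, fl)).1 p q
        = (mGet false c p q || L.any (fun a => winV_A b a j && decide (q = j ∧ a ≤ p ∧ p ≤ a + 2))) := by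
  induction L generalizing c fl with
  | nil => simp [hc]
  | cons a L ih =>
    have ha : a + 2 < m := hL a (by simp)
    have hL' : ∀ x ∈ L, x + 2 < m := fun x hx => hL x (by simp [hx])
    by_cases hw : winV_A b a j
    · have hc3 : CShape (mSet (mSet (mSet c a j true) (a+1) j true) (a+2) j true) m n :=
        cshape_mSet _ m n _ _ _ (cshape_mSet _ m n _ _ _ (cshape_mSet _ m n _ _ _ hc))
      obtain ⟨ih1, ih2, ih3⟩ := ih _ true hc3 hL'
      refine ⟨by simpa [hw] using ih1, ?_, ?_⟩
      · simp only [List.foldl_cons, if_pos hw]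
        rw [ih2]; simp [hw]
      · intro p q
        simp only [List.foldl_cons, if_pos hw]
        rw [ih3 p q, mGet_set3V c m n a j hc hj ha p q]
        simp [hw, Bool.or_assoc]
    · obtain ⟨ih1, ih2, ih3⟩ := ih c fl hc hL'
      refine ⟨by simpa [hw] using ih1, ?_, ?_⟩
      · simp only [List.foldl_cons, if_neg hw]
        rw [ih2]; simp [hw]
      · intro p q
        simp only [List.foldl_cons, if_neg hw]
        rw [ih3 p q]; simp [hw]

theorem markH_outer (b : List (List Int)) (m n : Nat) (L : List Nat)
    (c : List (List Bool)) (fl : Bool) (hc : CShape c m n) (hL : ∀ i ∈ L, i < m) :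
    CShape (L.foldl (fun s i => (List.range (n-2)).foldl (fun s j => if winH_A b i j then (mSet (mSet (mSet s.1 i j true) i (j+1) true) i (j+2) true, true) else s) s) (c, fl)).1 m n
    ∧ (L.foldl (fun s i => (List.range (n-2)).foldl (fun s j => if winH_A b i j then (mSet (mSet (mSet s.1 i j true) i (j+1) true) i (j+2) true, true) else s) s) (c, fl)).2
        = (fl || L.any (fun i => (List.range (n-2)).any (winH_A b i)))
    ∧ ∀ p q, mGet false (L.foldl (fun s i => (List.range (n-2)).foldl (fun s j => if winH_A b i j then (mSet (mSet (mSet s.1 i j true) i (j+1) true) i (j+2) true, true) else s) s) (c, fl)).1 p q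
        = (mGet false c p q || L.any (fun i => (List.range (n-2)).any (fun a => winH_A b i a && decide (p = i ∧ a ≤ q ∧ q ≤ a + 2)))) := by
  induction L generalizing c fl with
  | nil => simp [hc]
  | cons i L ih =>
    have hi : i < m := hL i (by simp)
    have hL' : ∀ x ∈ L, x < m := fun x hx => hL x (by simp [hx])
    have hr : ∀ a ∈ List.range (n-2), a + 2 < n := by
      intro a ha; have := List.mem_range.mp ha; omega
    obtain ⟨in1, in2, in3⟩ := markH_inner b m n i (List.range (n-2)) c fl hc hi hr
    obtain ⟨ih1, ih2, ih3⟩ := ih _ _ in1 hL'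
    refine ⟨?_, ?_, ?_⟩
    · simpa using ih1
    · simp only [List.foldl_cons]
      rw [ih2, in2]
      cases fl <;> simp [Bool.or_assoc]
    · intro p q
      simp only [List.foldl_cons]
      rw [ih3 p q, in3 p q]
      simp [Bool.or_assoc]

theorem markV_outer (b : List (List Int)) (m n : Nat) (L : List Nat)
    (c : List (List Bool)) (fl : Bool) (hc : CShape c m n) (hL : ∀ j ∈ L, j < n) :
    CShape (L.foldl (fun s j => (List.range (m-2)).foldl (fun s i => if winV_A b i j then (mSet (mSet (mSet s.1 i j true) (i+1) j true) (i+2) j true, true) else s) s) (c, fl)).1 m n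
    ∧ (L.foldl (fun s j => (List.range (m-2)).foldl (fun s i => if winV_A b i j then (mSet (mSet (mSet s.1 i j true) (i+1) j true) (i+2) j true, true) else s) s) (c, fl)).2
        = (fl || L.any (fun j => (List.range (m-2)).any (fun a => winV_A b a j)))
    ∧ ∀ p q, mGet false (L.foldl (fun s j => (List.range (m-2)).foldl (fun s i => if winV_A b i j then (mSet (mSet (mSet s.1 i j true) (i+1) j true) (i+2) j true, true) else s) s) (c, fl)).1 p q
        = (mGet false c p q || L.any (fun j => (List.range (m-2)).any (fun a => winV_A b a j && decide (q = j ∧ a ≤ p ∧ p ≤ a + 2)))) := by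
  induction L generalizing c fl with
  | nil => simp [hc]
  | cons j L ih =>
    have hj : j < n := hL j (by simp)
    have hL' : ∀ x ∈ L, x < n := fun x hx => hL x (by simp [hx])
    have hr : ∀ a ∈ List.range (m-2), a + 2 < m := by
      intro a ha; have := List.mem_range.mp ha; omega
    obtain ⟨in1, in2, in3⟩ := markV_inner b m n j (List.range (m-2)) c fl hc hj hr
    obtain ⟨ih1, ih2, ih3⟩ := ih _ _ in1 hL'
    refine ⟨?_, ?_, ?_⟩
    · simpa using ih1
    · simp only [List.foldl_cons]
      rw [ih2, in2]
      cases fl <;> simp [Bool.or_assoc]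
    · intro p q
      simp only [List.foldl_cons]
      rw [ih3 p q, in3 p q]
      simp [Bool.or_assoc]

theorem markA_char (b : List (List Int)) (m n : Nat) :
    CShape (markA b m n).1 m n
    ∧ (markA b m n).2 = ((List.range m).any (fun i => (List.range (n-2)).any (winH_A b i))
      || (List.range n).any (fun j => (List.range (m-2)).any (fun i => winV_A b i j)))
    ∧ ∀ p q, mGet false (markA b m n).1 p q = markSpec b m n p q := by
  unfold markA
  obtain ⟨h1, h2, h3⟩ := markH_outer b m n (List.range m)
    (List.replicate m (List.replicate n false)) false (cshape_replicate m n)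
    (fun i hi => List.mem_range.mp hi)
  obtain ⟨v1, v2, v3⟩ := markV_outer b m n (List.range n) _ _ h1
    (fun j hj => List.mem_range.mp hj)
  refine ⟨v1, ?_, ?_⟩
  · rw [v2, h2]; simp
  · intro p q
    rw [v3 p q, h3 p q, mGet_replicate]
    simp only [Bool.false_or]
    apply Bool.eq_iff_iff.mpr
    simp only [markSpec, Bool.or_eq_true, Bool.and_eq_true, List.any_eq_true, List.mem_range,
      decide_eq_true_eq]
    constructor
    · rintro (⟨i, him, a, ha, hw, rfl, h5, h6⟩ | ⟨j, hjn, a, ha, hw, rfl, h5, h6⟩)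
      · exact Or.inl ⟨him, a, ha, hw, h5, h6⟩
      · exact Or.inr ⟨hjn, a, ha, hw, h5, h6⟩
    · rintro (⟨hpm, a, ha, hw, h5, h6⟩ | ⟨hqn, a, ha, hw, h5, h6⟩)
      · exact Or.inl ⟨p, hpm, a, ha, hw, rfl, h5, h6⟩
      · exact Or.inr ⟨q, hqn, a, ha, hw, rfl, h5, h6⟩

def Shape (b : List (List Int)) (m n : Nat) : Prop :=
  b.length = m ∧ ∀ r ∈ b, n ≤ r.length

theorem shape_mSet (b : List (List Int)) (m n i j : Nat) (v : Int) (hs : Shape b m n) :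
    Shape (mSet b i j v) m n := by
  obtain ⟨h1, h2⟩ := hs
  by_cases hi : i < b.length
  · refine ⟨by simp [mSet, h1], ?_⟩
    intro r hr
    rcases List.mem_or_eq_of_mem_set hr with h | h
    · exact h2 r h
    · subst h
      rw [List.length_set]
      have : b.getD i [] = b[i] := by
        simp [List.getD_eq_getElem?_getD, List.getElem?_eq_getElem hi]
      rw [this]
      exact h2 _ (List.getElem_mem hi)
  · have : mSet b i j v = b := by
      unfold mSet
      exact List.set_eq_of_length_le (by omega)
    rw [this]; exact ⟨h1, h2⟩

theorem shape_row_len (b : List (List Int)) (m n p : Nat) (hs : Shape b m n) (hp : p < m) :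
    n ≤ (b.getD p []).length := by
  have hpl : p < b.length := by rw [hs.1]; exact hp
  have : b.getD p [] = b[p] := by
    simp [List.getD_eq_getElem?_getD, List.getElem?_eq_getElem hpl]
  rw [this]
  exact hs.2 _ (List.getElem_mem hpl)

theorem mat_ext (b1 b2 : List (List Int)) (h1 : b1.length = b2.length)
    (h2 : ∀ p, (b1.getD p []).length = (b2.getD p []).length)
    (h3 : ∀ p q, mGet 0 b1 p q = mGet 0 b2 p q) : b1 = b2 := by
  apply List.ext_getElem h1
  intro p hp1 hp2
  have hrow : (b1.getD p []).length = (b2.getD p []).length := h2 p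
  have e1 : b1.getD p [] = b1[p] := by simp [List.getD_eq_getElem?_getD, List.getElem?_eq_getElem hp1]
  have e2 : b2.getD p [] = b2[p] := by simp [List.getD_eq_getElem?_getD, List.getElem?_eq_getElem hp2]
  apply List.ext_getElem (by rw [← e1, ← e2]; exact hrow)
  intro q hq1 hq2
  have := h3 p q
  simp only [mGet, e1, e2] at this
  rwa [List.getD_eq_getElem?_getD, List.getD_eq_getElem?_getD,
    List.getElem?_eq_getElem hq1, List.getElem?_eq_getElem hq2] at this

theorem crush_inner (b : List (List Int)) (c : List (List Bool)) (m n i : Nat)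
    (L : List Nat) (hs : Shape b m n) (hi : i < m) (hL : ∀ j ∈ L, j < n) :
    Shape (L.foldl (fun b j => if mGet false c i j then mSet b i j 0 else b) b) m n
    ∧ (∀ p, ((L.foldl (fun b j => if mGet false c i j then mSet b i j 0 else b) b).getD p []).length = (b.getD p []).length)
    ∧ ∀ p q, mGet 0 (L.foldl (fun b j => if mGet false c i j then mSet b i j 0 else b) b) p q
        = if p = i ∧ q ∈ L ∧ mGet false c i q then 0 else mGet 0 b p q := by
  induction L generalizing b with
  | nil => simp [hs]
  | cons j L ih =>
    have hj : j < n := hL j (by simp)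
    have hL' : ∀ x ∈ L, x < n := fun x hx => hL x (by simp [hx])
    by_cases hc : mGet false c i j
    · have hs' : Shape (mSet b i j 0) m n := shape_mSet b m n i j 0 hs
      obtain ⟨ih1, ih2, ih3⟩ := ih (mSet b i j 0) hs' hL'
      refine ⟨by simpa [hc] using ih1, ?_, ?_⟩
      · intro p
        simp only [List.foldl_cons, if_pos hc]
        rw [ih2 p, row_mSet]
      · intro p q
        simp only [List.foldl_cons, if_pos hc]
        rw [ih3 p q, mGet_mSet 0 b i j 0 p q (by rw [hs.1]; exact hi) (by have := shape_row_len b m n i hs hi; omega)]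
        by_cases hp : p = i <;> by_cases hq : q = j <;>
          simp_all [List.mem_cons] <;> tauto
    · obtain ⟨ih1, ih2, ih3⟩ := ih b hs hL'
      refine ⟨by simpa [hc] using ih1, ?_, ?_⟩
      · intro p
        simp only [List.foldl_cons, if_neg hc]
        exact ih2 p
      · intro p q
        simp only [List.foldl_cons, if_neg hc]
        rw [ih3 p q]
        by_cases hp : p = i <;> by_cases hq : q = j <;>
          simp_all [List.mem_cons] <;> tauto

theorem crush_outer (b : List (List Int)) (c : List (List Bool)) (m n : Nat)
    (L : List Nat) (hs : Shape b m n) (hL : ∀ i ∈ L, i < m) :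
    Shape (L.foldl (fun b i => (List.range n).foldl (fun b j => if mGet false c i j then mSet b i j 0 else b) b) b) m n
    ∧ (∀ p, ((L.foldl (fun b i => (List.range n).foldl (fun b j => if mGet false c i j then mSet b i j 0 else b) b) b).getD p []).length = (b.getD p []).length)
    ∧ ∀ p q, mGet 0 (L.foldl (fun b i => (List.range n).foldl (fun b j => if mGet false c i j then mSet b i j 0 else b) b) b) p q
        = if p ∈ L ∧ q < n ∧ mGet false c p q then 0 else mGet 0 b p q := by
  induction L generalizing b with
  | nil => simp [hs]
  | cons i L ih =>
    have hi : i < m := hL i (by simp)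
    have hL' : ∀ x ∈ L, x < m := fun x hx => hL x (by simp [hx])
    obtain ⟨in1, in2, in3⟩ := crush_inner b c m n i (List.range n) hs hi
      (fun j hj => List.mem_range.mp hj)
    obtain ⟨ih1, ih2, ih3⟩ := ih _ in1 hL'
    refine ⟨by simpa using ih1, ?_, ?_⟩
    · intro p
      simp only [List.foldl_cons]
      rw [ih2 p, in2 p]
    · intro p q
      simp only [List.foldl_cons]
      rw [ih3 p q, in3 p q]
      simp only [List.mem_range, List.mem_cons]
      by_cases hp : p = i <;> by_cases hq : q < n <;> simp_all <;> tauto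

theorem crushA_char (b : List (List Int)) (c : List (List Bool)) (m n : Nat) (hs : Shape b m n) :
    Shape (crushA b c m n) m n
    ∧ (∀ p, ((crushA b c m n).getD p []).length = (b.getD p []).length)
    ∧ ∀ p q, mGet 0 (crushA b c m n) p q
        = if p < m ∧ q < n ∧ mGet false c p q then 0 else mGet 0 b p q := by
  obtain ⟨h1, h2, h3⟩ := crush_outer b c m n (List.range m) hs (fun i hi => List.mem_range.mp hi)
  exact ⟨h1, h2, fun p q => by unfold crushA; rw [h3 p q]; simp [List.mem_range]⟩

theorem fillZ_char (b : List (List Int)) (j : Nat) (wi : Int) (m n : Nat)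
    (hs : Shape b m n) (hj : j < n) (hw : wi < (m : Int)) :
    Shape (fillZ b j wi) m n
    ∧ (∀ p, ((fillZ b j wi).getD p []).length = (b.getD p []).length)
    ∧ ∀ p q, mGet 0 (fillZ b j wi) p q
        = if q = j ∧ (p : Int) ≤ wi then 0 else mGet 0 b p q := by
  generalize hgen : (wi + 1).toNat = fuel
  induction fuel generalizing b wi with
  | zero =>
    have hneg : ¬ 0 ≤ wi := by omega
    rw [fillZ, dif_neg hneg]
    refine ⟨hs, fun p => rfl, ?_⟩
    intro p q
    have : ¬ (q = j ∧ (p : Int) ≤ wi) := by rintro ⟨-, hple⟩; omega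
    rw [if_neg this]
  | succ f ih =>
    by_cases h : 0 ≤ wi
    · obtain ⟨ih1, ih2, ih3⟩ := ih (mSet b wi.toNat j 0) (wi - 1)
        (shape_mSet b m n wi.toNat j 0 hs) (by omega) (by omega)
      rw [fillZ, dif_pos h]
      refine ⟨ih1, ?_, ?_⟩
      · intro p
        rw [ih2 p, row_mSet]
      · intro p q
        rw [ih3 p q, mGet_mSet 0 b wi.toNat j 0 p q (by rw [hs.1]; omega)
          (by have := shape_row_len b m n wi.toNat hs (by omega); omega)]
        by_cases hq : q = j <;> by_cases hp : (p : Int) ≤ wi - 1 <;>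
          by_cases hp2 : p = wi.toNat <;> simp_all <;> omega
    · rw [fillZ, dif_neg h]
      refine ⟨hs, fun p => rfl, ?_⟩
      intro p q
      have : ¬ (q = j ∧ (p : Int) ≤ wi) := by rintro ⟨-, hple⟩; omega
      rw [if_neg this]

theorem drop_fold (b : List (List Int)) (m n j : Nat) (k : Nat) (wi : Int)
    (hs : Shape b m n) (hj : j < n) (hk : (k : Int) ≤ wi + 1) (hw : wi < (m : Int)) :
    Shape ((((List.range k).reverse).foldl
        (fun (s : List (List Int) × Int) i =>
          if mGet 0 s.1 i j != 0 then (mSet s.1 s.2.toNat j (mGet 0 s.1 i j), s.2 - 1) else s)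
        (b, wi)).1) m n
    ∧ (∀ p, (((((List.range k).reverse).foldl
        (fun (s : List (List Int) × Int) i =>
          if mGet 0 s.1 i j != 0 then (mSet s.1 s.2.toNat j (mGet 0 s.1 i j), s.2 - 1) else s)
        (b, wi)).1).getD p []).length = (b.getD p []).length)
    ∧ ((((List.range k).reverse).foldl
        (fun (s : List (List Int) × Int) i =>
          if mGet 0 s.1 i j != 0 then (mSet s.1 s.2.toNat j (mGet 0 s.1 i j), s.2 - 1) else s)
        (b, wi)).2)
      = wi - ((((List.range k).map (fun i => mGet 0 b i j)).filter (fun v => v != 0)).length : Int)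
    ∧ ∀ p q, mGet 0 ((((List.range k).reverse).foldl
        (fun (s : List (List Int) × Int) i =>
          if mGet 0 s.1 i j != 0 then (mSet s.1 s.2.toNat j (mGet 0 s.1 i j), s.2 - 1) else s)
        (b, wi)).1) p q
      = (if q = j ∧ wi - (((((List.range k).map (fun i => mGet 0 b i j)).filter (fun v => v != 0)).length : Nat) : Int) < (p : Int) ∧ (p : Int) ≤ wi
         then ((((List.range k).map (fun i => mGet 0 b i j)).filter (fun v => v != 0))).getD ((p : Int) - (wi - ((((List.range k).map (fun i => mGet 0 b i j)).filter (fun v => v != 0)).length : Int)) - 1).toNat 0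
         else mGet 0 b p q) := by
  induction k generalizing b wi with
  | zero =>
    simp only [List.range_zero, List.reverse_nil, List.foldl_nil, List.map_nil,
      List.filter_nil, List.length_nil, Nat.cast_zero]
    refine ⟨hs, by simp, by omega, ?_⟩
    intro p q
    have : ¬ (q = j ∧ wi - 0 < (p : Int) ∧ (p : Int) ≤ wi) := by
      rintro ⟨-, h1, h2⟩; omega
    rw [if_neg this]
  | succ k ih =>
    have hrev : (List.range (k+1)).reverse = k :: (List.range k).reverse := by
      rw [List.range_succ, List.reverse_append]; rfl
    rw [hrev]
    simp only [List.foldl_cons]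
    have h0wi : 0 ≤ wi := by omega
    by_cases hv : mGet 0 b k j != 0
    · -- nonzero: write it at wi, pointer moves down
      simp only [if_pos hv]
      set v := mGet 0 b k j with hvdef
      set b' := mSet b wi.toNat j v with hb'
      have hs' : Shape b' m n := shape_mSet b m n wi.toNat j v hs
      have hilen : wi.toNat < b.length := by rw [hs.1]; omega
      have hjlen : j < (b.getD wi.toNat []).length := by
        have := shape_row_len b m n wi.toNat hs (by omega); omega
      have hmap : (List.range k).map (fun i => mGet 0 b' i j)
          = (List.range k).map (fun i => mGet 0 b i j) := by
        apply List.map_congr_left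
        intro i hi
        have hik : i < k := List.mem_range.mp hi
        rw [hb', mGet_mSet 0 b wi.toNat j v i j hilen hjlen]
        have : ¬ (i = wi.toNat ∧ j = j) := by rintro ⟨h1, -⟩; omega
        rw [if_neg this]
      obtain ⟨ih1, ih2, ihflag, ih3⟩ := ih b' (wi - 1) hs' (by omega) (by omega)
      rw [hmap] at ihflag ih3
      have hfil : ((List.range (k+1)).map (fun i => mGet 0 b i j)).filter (fun v => v != 0)
          = (((List.range k).map (fun i => mGet 0 b i j)).filter (fun v => v != 0)) ++ [v] := by
        rw [List.range_succ, List.map_append, List.filter_append]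
        simp [← hvdef, hv]
      rw [hfil]
      set nz := ((List.range k).map (fun i => mGet 0 b i j)).filter (fun v => v != 0) with hnz
      set c := nz.length with hc
      refine ⟨ih1, ?_, ?_, ?_⟩
      · intro p
        rw [ih2 p, hb', row_mSet]
      · rw [ihflag]
        simp only [List.length_append, List.length_cons, List.length_nil]
        push_cast
        omega
      · intro p q
        rw [ih3 p q]
        by_cases hq : q = j
        · subst hq
          by_cases hA : wi - 1 - (c : Int) < (p : Int) ∧ (p : Int) ≤ wi - 1
          · rw [if_pos ⟨rfl, hA.1, hA.2⟩]
            have hlen : ((p : Int) - (wi - ((c : Int) + 1)) - 1).toNat < c := by omega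
            have : (nz ++ [v]).getD ((p : Int) - (wi - (((nz ++ [v]).length : Nat) : Int)) - 1).toNat 0
                = nz.getD ((p : Int) - (wi - ((c : Int) + 1)) - 1).toNat 0 := by
              simp only [List.length_append, List.length_cons, List.length_nil]
              rw [List.getD_append _ _ _ _ (by push_cast; omega)]
              first
              | rfl
              | (congr 1; omega)
            rw [if_pos ⟨rfl, by simp only [List.length_append, List.length_cons, List.length_nil]; push_cast; omega, by omega⟩]
            rw [this]
            congr 1
            omega
          · rw [if_neg (by rintro ⟨-, h1, h2⟩; exact hA ⟨h1, h2⟩)]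
            rw [hb', mGet_mSet 0 b wi.toNat _ v p _ hilen hjlen]
            by_cases hB : (p : Int) = wi
            · rw [if_pos ⟨by omega, rfl⟩]
              rw [if_pos ⟨rfl, by simp only [List.length_append, List.length_cons, List.length_nil]; push_cast; omega, by omega⟩]
              have hidx : ((p : Int) - (wi - (((nz ++ [v]).length : Nat) : Int)) - 1).toNat = c := by
                simp only [List.length_append, List.length_cons, List.length_nil]
                push_cast
                omega
              rw [hidx, List.getD_append_right _ _ _ _ (by omega)]
              simp [hc]
            · rw [if_neg (by rintro ⟨h1, -⟩; exact hB (by omega))]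
              rw [if_neg (by
                rintro ⟨-, h1, h2⟩
                simp only [List.length_append, List.length_cons, List.length_nil] at h1
                push_cast at h1
                omega)]
        · rw [if_neg (by rintro ⟨h1, -⟩; exact hq h1)]
          rw [if_neg (by rintro ⟨h1, -⟩; exact hq h1)]
          rw [hb', mGet_mSet 0 b wi.toNat j v p q hilen hjlen]
          rw [if_neg (by rintro ⟨-, h1⟩; exact hq h1)]
    · -- zero cell: state unchanged
      simp only [if_neg hv]
      obtain ⟨ih1, ih2, ihf, ih3⟩ := ih b wi hs (by omega) hw
      have hfil : ((List.range (k+1)).map (fun i => mGet 0 b i j)).filter (fun v => v != 0)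
          = ((List.range k).map (fun i => mGet 0 b i j)).filter (fun v => v != 0) := by
        rw [List.range_succ, List.map_append, List.filter_append]
        simp [hv]
      rw [hfil]
      exact ⟨ih1, ih2, ihf, ih3⟩

def nzCol (b : List (List Int)) (m j : Nat) : List Int :=
  ((List.range m).map (fun i => mGet 0 b i j)).filter (fun v => v != 0)

theorem nzCol_le (b : List (List Int)) (m j : Nat) : (nzCol b m j).length ≤ m := by
  calc (nzCol b m j).length ≤ ((List.range m).map (fun i => mGet 0 b i j)).length :=
        List.length_filter_le _ _
    _ = m := by simp

theorem dropColA_char (b : List (List Int)) (m n j : Nat) (hs : Shape b m n) (hj : j < n) :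
    Shape (dropColA b j m) m n
    ∧ (∀ p, ((dropColA b j m).getD p []).length = (b.getD p []).length)
    ∧ ∀ p q, mGet 0 (dropColA b j m) p q
        = if q = j ∧ p < m
          then (List.replicate (m - (nzCol b m j).length) 0 ++ nzCol b m j).getD p 0
          else mGet 0 b p q := by
  obtain ⟨d1, d2, dflag, d3⟩ := drop_fold b m n j m ((m : Int) - 1) hs hj (by omega) (by omega)
  have hdef : dropColA b j m
      = fillZ ((((List.range m).reverse).foldl
          (fun (s : List (List Int) × Int) i =>
            if mGet 0 s.1 i j != 0 then (mSet s.1 s.2.toNat j (mGet 0 s.1 i j), s.2 - 1) else s)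
          (b, (m : Int) - 1)).1) j
        ((((List.range m).reverse).foldl
          (fun (s : List (List Int) × Int) i =>
            if mGet 0 s.1 i j != 0 then (mSet s.1 s.2.toNat j (mGet 0 s.1 i j), s.2 - 1) else s)
          (b, (m : Int) - 1)).2) := rfl
  rw [hdef, dflag]
  have hc : (nzCol b m j).length ≤ m := nzCol_le b m j
  set nz := ((List.range m).map (fun i => mGet 0 b i j)).filter (fun v => v != 0) with hnz
  have hnz' : nzCol b m j = nz := rfl
  set c := nz.length with hcdef
  obtain ⟨f1, f2, f3⟩ := fillZ_char _ j ((m : Int) - 1 - (c : Int)) m n d1 hj (by omega)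
  rw [hnz'] at hc
  refine ⟨f1, ?_, ?_⟩
  · intro p
    rw [f2 p, d2 p]
  · intro p q
    rw [f3 p q, d3 p q, hnz']
    by_cases hq : q = j
    · subst hq
      by_cases h1 : (p : Int) ≤ (m : Int) - 1 - (c : Int)
      · rw [if_pos ⟨rfl, h1⟩, if_pos ⟨rfl, by omega⟩]
        rw [List.getD_append _ _ _ _ (by simp; omega)]
        simp
      · rw [if_neg (by rintro ⟨-, hh⟩; exact h1 hh)]
        by_cases h2 : p < m
        · rw [if_pos ⟨rfl, by omega, by omega⟩, if_pos ⟨rfl, h2⟩]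
          rw [List.getD_append_right _ _ _ _ (by simp; omega)]
          congr 1
          simp only [List.length_replicate]
          omega
        · rw [if_neg (by rintro ⟨-, -, hh⟩; omega), if_neg (by rintro ⟨-, hh⟩; exact h2 hh)]
    · rw [if_neg (by rintro ⟨hh, -⟩; exact hq hh),
         if_neg (by rintro ⟨hh, -⟩; exact hq hh),
         if_neg (by rintro ⟨hh, -⟩; exact hq hh)]

theorem drop_cols (b : List (List Int)) (m n : Nat) (L : List Nat) (hs : Shape b m n)
    (hL : ∀ j ∈ L, j < n) (hnd : L.Nodup) :
    Shape (L.foldl (fun b j => dropColA b j m) b) m n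
    ∧ (∀ p, ((L.foldl (fun b j => dropColA b j m) b).getD p []).length = (b.getD p []).length)
    ∧ ∀ p q, mGet 0 (L.foldl (fun b j => dropColA b j m) b) p q
        = if q ∈ L ∧ p < m
          then (List.replicate (m - (nzCol b m q).length) 0 ++ nzCol b m q).getD p 0
          else mGet 0 b p q := by
  induction L generalizing b with
  | nil => simp [hs]
  | cons j L ih =>
    have hj : j < n := hL j (by simp)
    have hL' : ∀ x ∈ L, x < n := fun x hx => hL x (by simp [hx])
    have hjL : j ∉ L := (List.nodup_cons.mp hnd).1
    have hnd' : L.Nodup := (List.nodup_cons.mp hnd).2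
    obtain ⟨c1, c2, c3⟩ := dropColA_char b m n j hs hj
    obtain ⟨ih1, ih2, ih3⟩ := ih _ c1 hL' hnd'
    have hcol : ∀ q, q ≠ j → nzCol (dropColA b j m) m q = nzCol b m q := by
      intro q hqj
      unfold nzCol
      congr 1
      apply List.map_congr_left
      intro i hi
      rw [c3 i q, if_neg (by rintro ⟨hh, -⟩; exact hqj hh)]
    refine ⟨ih1, ?_, ?_⟩
    · intro p
      simp only [List.foldl_cons]
      rw [ih2 p, c2 p]
    · intro p q
      simp only [List.foldl_cons]
      rw [ih3 p q]
      by_cases hqL : q ∈ L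
      · have hqj : q ≠ j := fun h => hjL (h ▸ hqL)
        rw [hcol q hqj]
        by_cases hp : p < m
        · rw [if_pos ⟨hqL, hp⟩, if_pos ⟨by simp [hqL], hp⟩]
        · rw [if_neg (by rintro ⟨-, hh⟩; exact hp hh), if_neg (by rintro ⟨-, hh⟩; exact hp hh),
             c3 p q, if_neg (by rintro ⟨hh, -⟩; exact hqj hh)]
      · rw [if_neg (by rintro ⟨hh, -⟩; exact hqL hh), c3 p q]
        by_cases hqj : q = j
        · subst hqj
          by_cases hp : p < m
          · rw [if_pos ⟨rfl, hp⟩, if_pos ⟨by simp, hp⟩]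
          · rw [if_neg (by rintro ⟨-, hh⟩; exact hp hh), if_neg (by rintro ⟨-, hh⟩; exact hp hh)]
        · rw [if_neg (by rintro ⟨hh, -⟩; exact hqj hh),
             if_neg (by rintro ⟨hh, -⟩; simp at hh; tauto)]

theorem dropA_char (b : List (List Int)) (m n : Nat) (hs : Shape b m n) :
    Shape (dropA b m n) m n
    ∧ (∀ p, ((dropA b m n).getD p []).length = (b.getD p []).length)
    ∧ ∀ p q, mGet 0 (dropA b m n) p q
        = if q < n ∧ p < m
          then (List.replicate (m - (nzCol b m q).length) 0 ++ nzCol b m q).getD p 0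
          else mGet 0 b p q := by
  obtain ⟨h1, h2, h3⟩ := drop_cols b m n (List.range n) hs
    (fun j hj => List.mem_range.mp hj) (List.nodup_range)
  exact ⟨h1, h2, fun p q => by unfold dropA; rw [h3 p q]; simp [List.mem_range]⟩

def colB (b : List (List Int)) (m n j : Nat) : List Int :=
  ((List.range m).filter (fun i => !crushableB b m n i j && (mGet 0 b i j != 0))).map
    (fun i => mGet 0 b i j)

theorem buildCol_fold (b : List (List Int)) (m n j : Nat) (L : List Nat)
    (acc : List Int) (fl : Bool) :
    L.foldl (fun (t : List Int × Bool) i =>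
      if crushableB b m n i j then (t.1, true)
      else if mGet 0 b i j != 0 then (t.1 ++ [mGet 0 b i j], t.2) else t) (acc, fl)
    = (acc ++ ((L.filter (fun i => !crushableB b m n i j && (mGet 0 b i j != 0))).map
        (fun i => mGet 0 b i j)),
       fl || L.any (fun i => crushableB b m n i j)) := by
  induction L generalizing acc fl with
  | nil => simp
  | cons i L ih =>
    by_cases hc : crushableB b m n i j
    · simp only [List.foldl_cons, if_pos hc]
      rw [ih]
      simp [hc]
    · by_cases hz : mGet 0 b i j != 0
      · simp only [List.foldl_cons, if_neg hc, if_pos hz]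
        rw [ih]
        simp [hc, hz]
      · simp only [List.foldl_cons, if_neg hc, if_neg hz]
        rw [ih]
        simp [hc, hz]

theorem buildColB_char (b : List (List Int)) (m n j : Nat) (fl : Bool) :
    buildColB b m n j fl = (colB b m n j, fl || (List.range m).any (fun i => crushableB b m n i j)) := by
  unfold buildColB colB
  exact buildCol_fold b m n j (List.range m) [] fl

theorem buildB_fold (b : List (List Int)) (m n : Nat) (L : List Nat)
    (acc : List (List Int)) (fl : Bool) :
    L.foldl (fun (s : List (List Int) × Bool) j =>
      let t := buildColB b m n j s.2
      (s.1 ++ [List.replicate (m - t.1.length) 0 ++ t.1], t.2)) (acc, fl)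
    = (acc ++ L.map (fun j => List.replicate (m - (colB b m n j).length) 0 ++ colB b m n j),
       fl || L.any (fun j => (List.range m).any (fun i => crushableB b m n i j))) := by
  induction L generalizing acc fl with
  | nil => simp
  | cons j L ih =>
    simp only [List.foldl_cons]
    rw [buildColB_char, ih]
    simp [Bool.or_assoc]

theorem buildB_char (b : List (List Int)) (m n : Nat) :
    buildB b m n = ((List.range n).map (fun j => List.replicate (m - (colB b m n j).length) 0 ++ colB b m n j),
      (List.range n).any (fun j => (List.range m).any (fun i => crushableB b m n i j))) := by
  exact (buildB_fold b m n (List.range n) [] false).trans (by simp)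

theorem write_inner (b : List (List Int)) (cols : List (List Int)) (m n j : Nat)
    (L : List Nat) (hs : Shape b m n) (hj : j < n) (hL : ∀ i ∈ L, i < m) :
    Shape (L.foldl (fun b i => mSet b i j (mGet 0 cols j i)) b) m n
    ∧ (∀ p, ((L.foldl (fun b i => mSet b i j (mGet 0 cols j i)) b).getD p []).length = (b.getD p []).length)
    ∧ ∀ p q, mGet 0 (L.foldl (fun b i => mSet b i j (mGet 0 cols j i)) b) p q
        = if q = j ∧ p ∈ L then mGet 0 cols j p else mGet 0 b p q := by
  induction L generalizing b with
  | nil => simp [hs]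
  | cons i L ih =>
    have hi : i < m := hL i (by simp)
    have hL' : ∀ x ∈ L, x < m := fun x hx => hL x (by simp [hx])
    have hs' : Shape (mSet b i j (mGet 0 cols j i)) m n := shape_mSet b m n i j _ hs
    obtain ⟨ih1, ih2, ih3⟩ := ih _ hs' hL'
    refine ⟨by simpa using ih1, ?_, ?_⟩
    · intro p
      simp only [List.foldl_cons]
      rw [ih2 p, row_mSet]
    · intro p q
      simp only [List.foldl_cons]
      rw [ih3 p q, mGet_mSet 0 b i j _ p q (by rw [hs.1]; omega)
        (by have := shape_row_len b m n i hs hi; omega)]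
      by_cases hq : q = j <;> by_cases hp : p = i <;> by_cases hpL : p ∈ L <;>
        simp_all [List.mem_cons] <;> tauto

theorem write_outer (b : List (List Int)) (cols : List (List Int)) (m n : Nat)
    (L : List Nat) (hs : Shape b m n) (hL : ∀ j ∈ L, j < n) :
    Shape (L.foldl (fun b j => (List.range m).foldl (fun b i => mSet b i j (mGet 0 cols j i)) b) b) m n
    ∧ (∀ p, ((L.foldl (fun b j => (List.range m).foldl (fun b i => mSet b i j (mGet 0 cols j i)) b) b).getD p []).length = (b.getD p []).length)
    ∧ ∀ p q, mGet 0 (L.foldl (fun b j => (List.range m).foldl (fun b i => mSet b i j (mGet 0 cols j i)) b) b) p q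
        = if q ∈ L ∧ p < m then mGet 0 cols q p else mGet 0 b p q := by
  induction L generalizing b with
  | nil => simp [hs]
  | cons j L ih =>
    have hj : j < n := hL j (by simp)
    have hL' : ∀ x ∈ L, x < n := fun x hx => hL x (by simp [hx])
    obtain ⟨in1, in2, in3⟩ := write_inner b cols m n j (List.range m) hs hj
      (fun i hi => List.mem_range.mp hi)
    obtain ⟨ih1, ih2, ih3⟩ := ih _ in1 hL'
    refine ⟨by simpa using ih1, ?_, ?_⟩
    · intro p
      simp only [List.foldl_cons]
      rw [ih2 p, in2 p]
    · intro p q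
      simp only [List.foldl_cons]
      rw [ih3 p q, in3 p q]
      simp only [List.mem_range, List.mem_cons]
      by_cases hq : q = j <;> by_cases hqL : q ∈ L <;> by_cases hp : p < m <;>
        simp_all <;> tauto

theorem writeB_char (b : List (List Int)) (cols : List (List Int)) (m n : Nat) (hs : Shape b m n) :
    Shape (writeB b cols m n) m n
    ∧ (∀ p, ((writeB b cols m n).getD p []).length = (b.getD p []).length)
    ∧ ∀ p q, mGet 0 (writeB b cols m n) p q
        = if q < n ∧ p < m then mGet 0 cols q p else mGet 0 b p q := by
  obtain ⟨h1, h2, h3⟩ := write_outer b cols m n (List.range n) hs (fun j hj => List.mem_range.mp hj)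
  exact ⟨h1, h2, fun p q => by unfold writeB; rw [h3 p q]; simp [List.mem_range]⟩

theorem winH_transfer (b : List (List Int)) (p a q : Nat) (h1 : a ≤ q) (h2 : q ≤ a + 2)
    (e1 : mGet 0 b p a = mGet 0 b p (a+1)) (e2 : mGet 0 b p (a+1) = mGet 0 b p (a+2)) :
    mGet 0 b p q = mGet 0 b p a := by
  have : q = a ∨ q = a + 1 ∨ q = a + 2 := by omega
  rcases this with rfl | h | h
  · rfl
  · rw [h, ← e1]
  · rw [h, ← e2, ← e1]

theorem winV_transfer (b : List (List Int)) (a q p : Nat) (h1 : a ≤ p) (h2 : p ≤ a + 2)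
    (e1 : mGet 0 b a q = mGet 0 b (a+1) q) (e2 : mGet 0 b (a+1) q = mGet 0 b (a+2) q) :
    mGet 0 b p q = mGet 0 b a q := by
  have : p = a ∨ p = a + 1 ∨ p = a + 2 := by omega
  rcases this with rfl | h | h
  · rfl
  · rw [h, ← e1]
  · rw [h, ← e2, ← e1]

theorem markSpec_iff (b : List (List Int)) (m n p q : Nat) :
    markSpec b m n p q = true ↔
      ((p < m ∧ ∃ a, a < n - 2 ∧ (mGet 0 b p a ≠ 0 ∧ mGet 0 b p a = mGet 0 b p (a+1) ∧ mGet 0 b p (a+1) = mGet 0 b p (a+2)) ∧ a ≤ q ∧ q ≤ a + 2)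
      ∨ (q < n ∧ ∃ a, a < m - 2 ∧ (mGet 0 b a q ≠ 0 ∧ mGet 0 b a q = mGet 0 b (a+1) q ∧ mGet 0 b (a+1) q = mGet 0 b (a+2) q) ∧ a ≤ p ∧ p ≤ a + 2)) := by
  simp [markSpec, winH_A, winV_A, List.any_eq_true, List.mem_range, and_assoc]

theorem crushableB_iff (b : List (List Int)) (m n p q : Nat) :
    crushableB b m n p q = true ↔
      mGet 0 b p q ≠ 0 ∧
      ((∃ a, a + 2 < n ∧ a ≤ q ∧ q ≤ a + 2 ∧ mGet 0 b p a = mGet 0 b p (a+1) ∧ mGet 0 b p (a+1) = mGet 0 b p (a+2))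
      ∨ (∃ a, a + 2 < m ∧ a ≤ p ∧ p ≤ a + 2 ∧ mGet 0 b a q = mGet 0 b (a+1) q ∧ mGet 0 b (a+1) q = mGet 0 b (a+2) q)) := by
  unfold crushableB
  by_cases hz : mGet 0 b p q == 0
  · simp only [if_pos hz]
    simp at hz
    simp [hz]
  · simp only [if_neg hz]
    simp at hz
    simp only [List.any_cons, List.any_nil, Bool.or_false, Bool.or_eq_true, Bool.and_eq_true,
      decide_eq_true_eq, hWin, vWin, beq_iff_eq]
    constructor
    · rintro ((⟨⟨h0, hlt⟩, e1, e2⟩ | ⟨⟨h0, hlt⟩, e1, e2⟩ | ⟨⟨h0, hlt⟩, e1, e2⟩) |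
              (⟨⟨h0, hlt⟩, e1, e2⟩ | ⟨⟨h0, hlt⟩, e1, e2⟩ | ⟨⟨h0, hlt⟩, e1, e2⟩))
      · exact ⟨hz, Or.inl ⟨_, by omega, by omega, by omega, e1, e2⟩⟩
      · exact ⟨hz, Or.inl ⟨_, by omega, by omega, by omega, e1, e2⟩⟩
      · exact ⟨hz, Or.inl ⟨_, by omega, by omega, by omega, e1, e2⟩⟩
      · exact ⟨hz, Or.inr ⟨_, by omega, by omega, by omega, e1, e2⟩⟩
      · exact ⟨hz, Or.inr ⟨_, by omega, by omega, by omega, e1, e2⟩⟩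
      · exact ⟨hz, Or.inr ⟨_, by omega, by omega, by omega, e1, e2⟩⟩
    · rintro ⟨-, (⟨a, hlt, h1, h2, e1, e2⟩ | ⟨a, hlt, h1, h2, e1, e2⟩)⟩
      · have hcase : q = a ∨ q = a + 1 ∨ q = a + 2 := by omega
        rcases hcase with rfl | rfl | rfl
        · refine Or.inl (Or.inr (Or.inr ⟨⟨by omega, by omega⟩, ?_, ?_⟩))
          · rw [show ((q : Int)).toNat = q from by omega]; exact e1
          · rw [show ((q : Int)).toNat = q from by omega]; exact e2
        · refine Or.inl (Or.inr (Or.inl ⟨⟨by omega, by omega⟩, ?_, ?_⟩))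
          · rw [show (((a + 1 : Nat) : Int) - 1).toNat = a from by omega]; exact e1
          · rw [show (((a + 1 : Nat) : Int) - 1).toNat = a from by omega]; exact e2
        · refine Or.inl (Or.inl ⟨⟨by omega, by omega⟩, ?_, ?_⟩)
          · rw [show (((a + 2 : Nat) : Int) - 2).toNat = a from by omega]; exact e1
          · rw [show (((a + 2 : Nat) : Int) - 2).toNat = a from by omega]; exact e2
      · have hcase : p = a ∨ p = a + 1 ∨ p = a + 2 := by omega
        rcases hcase with rfl | rfl | rfl
        · refine Or.inr (Or.inr (Or.inr ⟨⟨by omega, by omega⟩, ?_, ?_⟩))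
          · rw [show ((p : Int)).toNat = p from by omega]; exact e1
          · rw [show ((p : Int)).toNat = p from by omega]; exact e2
        · refine Or.inr (Or.inr (Or.inl ⟨⟨by omega, by omega⟩, ?_, ?_⟩))
          · rw [show (((a + 1 : Nat) : Int) - 1).toNat = a from by omega]; exact e1
          · rw [show (((a + 1 : Nat) : Int) - 1).toNat = a from by omega]; exact e2
        · refine Or.inr (Or.inl ⟨⟨by omega, by omega⟩, ?_, ?_⟩)
          · rw [show (((a + 2 : Nat) : Int) - 2).toNat = a from by omega]; exact e1
          · rw [show (((a + 2 : Nat) : Int) - 2).toNat = a from by omega]; exact e2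

theorem markSpec_eq_crushable (b : List (List Int)) (m n p q : Nat)
    (hp : p < m) (hq : q < n) :
    markSpec b m n p q = crushableB b m n p q := by
  apply Bool.eq_iff_iff.mpr
  rw [markSpec_iff, crushableB_iff]
  constructor
  · rintro (⟨-, a, han, ⟨hne, e1, e2⟩, h1, h2⟩ | ⟨-, a, ham, ⟨hne, e1, e2⟩, h1, h2⟩)
    · have hv := winH_transfer b p a q h1 h2 e1 e2
      exact ⟨by rw [hv]; exact hne, Or.inl ⟨a, by omega, h1, h2, e1, e2⟩⟩
    · have hv := winV_transfer b a q p h1 h2 e1 e2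
      exact ⟨by rw [hv]; exact hne, Or.inr ⟨a, by omega, h1, h2, e1, e2⟩⟩
  · rintro ⟨hne, (⟨a, hlt, h1, h2, e1, e2⟩ | ⟨a, hlt, h1, h2, e1, e2⟩)⟩
    · have hv := winH_transfer b p a q h1 h2 e1 e2
      exact Or.inl ⟨hp, a, by omega, ⟨by rw [← hv]; exact hne, e1, e2⟩, h1, h2⟩
    · have hv := winV_transfer b a q p h1 h2 e1 e2
      exact Or.inr ⟨hq, a, by omega, ⟨by rw [← hv]; exact hne, e1, e2⟩, h1, h2⟩

theorem winH_A_iff (b : List (List Int)) (i a : Nat) :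
    winH_A b i a = true ↔ mGet 0 b i a ≠ 0 ∧ mGet 0 b i a = mGet 0 b i (a+1) ∧ mGet 0 b i (a+1) = mGet 0 b i (a+2) := by
  simp [winH_A, and_assoc]

theorem winV_A_iff (b : List (List Int)) (i a : Nat) :
    winV_A b a i = true ↔ mGet 0 b a i ≠ 0 ∧ mGet 0 b a i = mGet 0 b (a+1) i ∧ mGet 0 b (a+1) i = mGet 0 b (a+2) i := by
  simp [winV_A, and_assoc]

theorem flag_eq (b : List (List Int)) (m n : Nat) :
    (markA b m n).2 = (buildB b m n).2 := by
  rw [(markA_char b m n).2.1, buildB_char]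
  apply Bool.eq_iff_iff.mpr
  simp only [Bool.or_eq_true, List.any_eq_true, List.mem_range]
  constructor
  · rintro (⟨i, hi, a, ha, hw⟩ | ⟨j, hj, a, ha, hw⟩)
    · obtain ⟨hne, e1, e2⟩ := (winH_A_iff b i a).mp hw
      exact ⟨a, by omega, i, hi, (crushableB_iff b m n i a).mpr
        ⟨hne, Or.inl ⟨a, by omega, by omega, by omega, e1, e2⟩⟩⟩
    · obtain ⟨hne, e1, e2⟩ := (winV_A_iff b j a).mp hw
      exact ⟨j, hj, a, by omega, (crushableB_iff b m n a j).mpr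
        ⟨hne, Or.inr ⟨a, by omega, by omega, by omega, e1, e2⟩⟩⟩
  · rintro ⟨j, hj, i, hi, hc⟩
    rcases (crushableB_iff b m n i j).mp hc with ⟨hne, (⟨a, hlt, h1, h2, e1, e2⟩ | ⟨a, hlt, h1, h2, e1, e2⟩)⟩
    · have hv := winH_transfer b i a j h1 h2 e1 e2
      exact Or.inl ⟨i, hi, a, by omega, (winH_A_iff b i a).mpr ⟨by rw [← hv]; exact hne, e1, e2⟩⟩
    · have hv := winV_transfer b a j i h1 h2 e1 e2
      exact Or.inr ⟨j, hj, a, by omega, (winV_A_iff b j a).mpr ⟨by rw [← hv]; exact hne, e1, e2⟩⟩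

theorem filter_map_crush (b : List (List Int)) (m n q : Nat) (L : List Nat) :
    ((L.map (fun i => if crushableB b m n i q then 0 else mGet 0 b i q)).filter (fun v => v != 0))
      = (L.filter (fun i => !crushableB b m n i q && (mGet 0 b i q != 0))).map (fun i => mGet 0 b i q) := by
  induction L with
  | nil => simp
  | cons i L ih =>
    by_cases hc : crushableB b m n i q
    · simp [hc, ih]
    · by_cases hz : mGet 0 b i q != 0
      · simp [hc, hz, ih]
      · simp [hc, hz, ih]

theorem getD_map_range {α : Type} (n q : Nat) (f : Nat → α) (d : α) (hq : q < n) :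
    ((List.range n).map f).getD q d = f q := by
  rw [List.getD_eq_getElem?_getD, List.getElem?_map]
  simp [List.getElem?_range, hq]

theorem step_eq (b : List (List Int)) (m n : Nat) (hs : Shape b m n) :
    dropA (crushA b (markA b m n).1 m n) m n = writeB b (buildB b m n).1 m n := by
  obtain ⟨-, -, mc3⟩ := markA_char b m n
  obtain ⟨cs, crow, cget⟩ := crushA_char b (markA b m n).1 m n hs
  obtain ⟨ds, drow, dget⟩ := dropA_char (crushA b (markA b m n).1 m n) m n cs
  obtain ⟨ws, wrow, wget⟩ := writeB_char b (buildB b m n).1 m n hs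
  have hcols : (buildB b m n).1 = (List.range n).map
      (fun j => List.replicate (m - (colB b m n j).length) 0 ++ colB b m n j) := by
    rw [buildB_char]
  have hcol : ∀ q, q < n → nzCol (crushA b (markA b m n).1 m n) m q = colB b m n q := by
    intro q hq
    unfold nzCol
    have hmapc : (List.range m).map (fun i => mGet 0 (crushA b (markA b m n).1 m n) i q)
        = (List.range m).map (fun i => if crushableB b m n i q then 0 else mGet 0 b i q) := by
      apply List.map_congr_left
      intro i hi
      have him : i < m := List.mem_range.mp hi
      rw [cget i q, mc3 i q, markSpec_eq_crushable b m n i q him hq]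
      by_cases hc : crushableB b m n i q
      · rw [if_pos ⟨him, hq, hc⟩, if_pos hc]
      · rw [if_neg (by rintro ⟨-, -, hh⟩; exact hc hh), if_neg hc]
    rw [hmapc, filter_map_crush]
    rfl
  apply mat_ext
  · rw [ds.1, ws.1]
  · intro p
    rw [drow p, crow p, wrow p]
  · intro p q
    rw [dget p q, wget p q]
    by_cases hq : q < n
    · by_cases hp : p < m
      · rw [if_pos ⟨hq, hp⟩, if_pos ⟨hq, hp⟩, hcol q hq, hcols]
        unfold mGet
        rw [getD_map_range n q _ [] hq]
      · rw [if_neg (by rintro ⟨-, hh⟩; exact hp hh), if_neg (by rintro ⟨-, hh⟩; exact hp hh),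
           cget p q, if_neg (by rintro ⟨hh, -⟩; exact hp hh)]
    · rw [if_neg (by rintro ⟨hh, -⟩; exact hq hh), if_neg (by rintro ⟨hh, -⟩; exact hq hh),
         cget p q, if_neg (by rintro ⟨-, hh, -⟩; exact hq hh)]

theorem loop_eq (fuel : Nat) (b : List (List Int)) (m n : Nat) (hs : Shape b m n) :
    loopA fuel b m n = loopB fuel b m n := by
  induction fuel generalizing b with
  | zero => rfl
  | succ f ih =>
    simp only [loopA, loopB]
    rw [flag_eq b m n]
    by_cases hbf : (buildB b m n).2
    · rw [hbf]
      simp only [Bool.not_true, Bool.false_eq_true, if_false]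
      rw [step_eq b m n hs]
      exact ih _ ((writeB_char b (buildB b m n).1 m n hs).1)
    · simp only [Bool.not_eq_true] at hbf
      rw [hbf]
      simp

-- ===== VERDICT (by name: the statement is the Claim_ definition above) =====
theorem candyCrush_spec : Claim_equal_candyCrush := by
  intro board _ hpre
  unfold Spec_candyCrush candyCrush candyCrush_alt
  exact loop_eq _ _ _ _ ⟨rfl, hpre.2⟩
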